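-- pv_equiv track=rewrite | github.com/tw-yoo/prj-vis-exp-pipeline | draw_plan/build_draw_plan.py | _contiguous_runs
-- ===== SOURCE A (Python) =====
-- from typing import Any, Dict, Iterable, List, Set
--
-- def _contiguous_runs(targets: List[str], domain: List[str]) -> List[List[str]]:
--     if not targets or not domain:
--         return []
--     selected = set(targets)
--     runs: List[List[str]] = []
--     current: List[str] = []
--     for label in domain:
--         if label in selected:
--             current.append(label)
--             continue
--         if current:
--             runs.append(current)
--             current = []
--     if current:
--         runs.append(current)
--     return runs
-- ===== SOURCE B (Python) =====
-- from typing import List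
--
-- def _contiguous_runs(targets: List[str], domain: List[str]) -> List[List[str]]:
--     selected = set(targets)
--     runs_rev: List[List[str]] = []   # runs in reverse order, each run built right-to-left
--     next_selected = False            # was the label to the right (already processed) selected?
--     for label in reversed(domain):
--         if label in selected:
--             if next_selected:
--                 runs_rev[-1].append(label)
--             else:
--                 runs_rev.append([label])
--             next_selected = True
--         else:
--             next_selected = False
--     return [run[::-1] for run in runs_rev][::-1]
-- ===== Notes on version B (the rewrite author's own statement) =====
-- stated objective: alternative
-- what changed: B traverses domain in reverse, appending each selected label into the run under construction (or opening a new run), then reverses the runs and their order at the end, eliminating A's forward current-run buffer, post-loop flush and empty-input guard.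
import Mathlib
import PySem

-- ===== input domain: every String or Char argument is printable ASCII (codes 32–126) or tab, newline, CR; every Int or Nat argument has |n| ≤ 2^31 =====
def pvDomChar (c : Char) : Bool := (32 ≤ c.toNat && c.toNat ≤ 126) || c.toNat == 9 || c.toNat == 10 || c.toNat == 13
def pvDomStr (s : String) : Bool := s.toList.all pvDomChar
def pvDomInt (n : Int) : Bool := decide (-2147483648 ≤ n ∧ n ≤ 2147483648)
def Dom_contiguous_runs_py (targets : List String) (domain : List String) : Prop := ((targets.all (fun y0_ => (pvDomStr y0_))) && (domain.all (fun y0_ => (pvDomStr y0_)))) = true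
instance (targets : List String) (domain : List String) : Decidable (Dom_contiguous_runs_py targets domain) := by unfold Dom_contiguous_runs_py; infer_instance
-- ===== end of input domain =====

-- B builds the runs back-to-front: it traverses domain in REVERSE, appending each selected
-- label into the run under construction (or opening a new run), then reverses runs and their
-- order; no current-run buffer, no flush step, no empty-input guard (objective: alternative).

-- ===== PORT A =====
-- literal transliteration of A: guard, forward loop over domain carrying (runs, current), final flush
def pyLoopA (sel : PySem.Set String) (runs : List (List String)) (cur : List String) :
    List String → List (List String)
  | [] => if cur ≠ [] then runs ++ [cur] else runs   -- the post-loop flush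
  | label :: rest =>
    if sel.contains label then pyLoopA sel runs (cur ++ [label]) rest
    else if cur ≠ [] then pyLoopA sel (runs ++ [cur]) [] rest
    else pyLoopA sel runs [] rest

def contiguous_runs_py (targets : List String) (domain : List String) : List (List String) :=
  if targets = [] ∨ domain = [] then []
  else pyLoopA (PySem.Set.ofList targets) [] [] domain

-- ===== PORT B =====
-- runs_rev[-1].append(label): append into the last run of the list
def appendLast : List (List String) → String → List (List String)
  | [], l => [[l]]                       -- unreachable (next_selected ⇒ runs_rev ≠ []); total-match arm
  | [r], l => [r ++ [l]]
  | r :: s :: rs, l => r :: appendLast (s :: rs) l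

-- one step of B's reversed loop: state = (runs_rev, was the label to the right selected?)
def stepB (sel : PySem.Set String) (st : List (List String) × Bool) (label : String) :
    List (List String) × Bool :=
  if sel.contains label then
    if st.2 then (appendLast st.1 label, true)   -- runs_rev[-1].append(label)
    else (st.1 ++ [[label]], true)               -- runs_rev.append([label])
  else (st.1, false)

def contiguous_runs_py_alt (targets : List String) (domain : List String) : List (List String) :=
  (((domain.reverse.foldl (stepB (PySem.Set.ofList targets)) ([], false)).1).map
    (fun run => run.reverse)).reverse            -- [run[::-1] for run in runs_rev][::-1]

-- ===== PRECONDITION & SPEC =====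
def Spec_contiguous_runs_py (targets : List String) (domain : List String) (out : List (List String)) : Prop := out = contiguous_runs_py_alt targets domain
instance (targets : List String) (domain : List String) (out : List (List String)) : Decidable (Spec_contiguous_runs_py targets domain out) := by unfold Spec_contiguous_runs_py; infer_instance

-- ===== CLAIM (what is proved, stated in full; the proofs are below) =====
def Claim_equal_contiguous_runs_py : Prop := ∀ (targets : List String) (domain : List String), Dom_contiguous_runs_py targets domain → Spec_contiguous_runs_py targets domain (contiguous_runs_py targets domain)

-- ===== LEMMAS AND PROOFS =====

-- proof-only characterisation of the runs: maximal selected blocks via takeWhile/dropWhile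
def groupRuns (sel : PySem.Set String) : List String → List (List String)
  | [] => []
  | x :: xs =>
    if sel.contains x then
      (x :: xs.takeWhile (fun y => sel.contains y)) ::
        groupRuns sel (xs.dropWhile (fun y => sel.contains y))
    else
      groupRuns sel xs
termination_by l => l.length
decreasing_by
  · exact Nat.lt_succ_of_le (List.length_dropWhile_le _ _)
  · exact Nat.lt_succ_self _

-- If no element is selected, there are no runs.
lemma groupRuns_nil_sel : ∀ (ds : List String), groupRuns [] ds = [] := by
  intro ds
  induction ds with
  | nil => simp [groupRuns]
  | cons d ds ih => simpa [groupRuns] using ih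

-- A's loop on accumulated (runs, cur) equals runs, the run cur is part of,
-- and the grouping of the rest.
lemma loop_eq_groupRuns (sel : PySem.Set String) (ds : List String) :
    ∀ (runs : List (List String)) (cur : List String),
      pyLoopA sel runs cur ds
      = runs ++ (if cur = [] then groupRuns sel ds
                 else (cur ++ ds.takeWhile (fun y => sel.contains y)) ::
                      groupRuns sel (ds.dropWhile (fun y => sel.contains y))) := by
  induction ds with
  | nil =>
      intro runs cur
      by_cases h : cur = [] <;> simp [h, pyLoopA, groupRuns]
  | cons d ds ih =>
      intro runs cur
      by_cases hd : d ∈ sel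
      · have hdc : sel.contains d = true := by simp [PySem.Set.contains, hd]
        by_cases hc : cur = []
        · subst hc
          simp only [pyLoopA, hdc, if_pos, List.nil_append, ih]
          simp [groupRuns, hd, List.takeWhile_cons, List.dropWhile_cons, PySem.Set.contains]
        · simp only [pyLoopA, hdc, if_pos, ih]
          have hcd : cur ++ [d] ≠ [] := by simp
          simp [hc, hcd, hd, List.takeWhile_cons, List.dropWhile_cons, PySem.Set.contains]
      · have hdc : sel.contains d = false := by simp [PySem.Set.contains, hd]
        by_cases hc : cur = []
        · subst hc
          simp only [pyLoopA, hdc, Bool.false_eq_true, if_false, ne_eq, not_true_eq_false,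
            not_false_eq_true, ih]
          simp [groupRuns, hd, PySem.Set.contains]
        · simp only [pyLoopA, hdc, Bool.false_eq_true, if_false, ne_eq, hc, not_false_eq_true,
            if_true, ih]
          simp [List.takeWhile_cons, hd, List.dropWhile_cons, groupRuns, hc, PySem.Set.contains]

lemma appendLast_cons (a : List String) (l : List (List String)) (x : String) (h : l ≠ []) :
    appendLast (a :: l) x = a :: appendLast l x := by
  cases l with
  | nil => exact absurd rfl h
  | cons s rs => rfl

lemma appendLast_snoc (L : List (List String)) (r : List String) (x : String) :
    appendLast (L ++ [r]) x = L ++ [r ++ [x]] := by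
  induction L with
  | nil => rfl
  | cons a L ih =>
      rw [List.cons_append, appendLast_cons a (L ++ [r]) x (by simp), ih, List.cons_append]

-- B's reversed loop, seen as a right fold, computes the grouping with both the runs and
-- their order reversed; its flag records whether the first remaining label is selected.
lemma foldr_stepB_eq (sel : PySem.Set String) :
    ∀ (ds : List String),
      List.foldr (fun x st => stepB sel st x) ([], false) ds
      = (((groupRuns sel ds).map List.reverse).reverse,
         match ds with | [] => false | d :: _ => sel.contains d) := by
  intro ds
  induction ds with
  | nil => simp [groupRuns]
  | cons d ds ih =>
      rw [List.foldr_cons, ih]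
      by_cases hd : d ∈ sel
      · cases ds with
        | nil => simp [stepB, hd, groupRuns, PySem.Set.contains]
        | cons e es =>
            by_cases he : e ∈ sel
            · have hdc : sel.contains d = true := by simp [PySem.Set.contains, hd]
              have hec : sel.contains e = true := by simp [PySem.Set.contains, he]
              simp only [groupRuns, hdc, hec, if_true, List.map_cons, List.reverse_cons, stepB,
                List.takeWhile_cons, List.dropWhile_cons]
              rw [appendLast_snoc]
            · simp [stepB, hd, he, groupRuns, PySem.Set.contains,
                List.takeWhile_cons, List.dropWhile_cons]
      · simp [stepB, hd, groupRuns, PySem.Set.contains]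

lemma alt_eq_groupRuns (targets domain : List String) :
    contiguous_runs_py_alt targets domain = groupRuns (PySem.Set.ofList targets) domain := by
  unfold contiguous_runs_py_alt
  rw [List.foldl_reverse, foldr_stepB_eq]
  simp [List.map_reverse, Function.comp]

-- ===== VERDICT (by name: the statement is the Claim_ definition above) =====
theorem contiguous_runs_py_spec : Claim_equal_contiguous_runs_py := by
  intro targets domain _
  unfold Spec_contiguous_runs_py contiguous_runs_py
  rw [alt_eq_groupRuns]
  by_cases hg : targets = [] ∨ domain = []
  · rcases hg with h | h
    · simp [h, PySem.Set.ofList, groupRuns_nil_sel]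
    · simp [h, groupRuns]
  · rw [if_neg hg, loop_eq_groupRuns]
    simp
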